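-- pv_equiv track=rewrite | github.com/hathienloc131/auto-graph-of-thoughts | graph_of_thoughts/error_utils/error_utils.py | error_score_sorting
-- ===== SOURCE A (Python) =====
-- def parse_list(str_list):
--
--     start_list = str_list.find('[') if str_list.find('[') != -1 else 0
--     end_list = str_list.find(']') if str_list.find(']') != -1 else len(str_list)
--     list = str_list[start_list: end_list].replace(' ', '').replace("[", "").replace("]", "").replace("{", "").replace("}", "").split(',')
--     real_list = []
--     for x in list:
--         try:
--             if x.isdigit():
--                 real_list.append(int(x))
--         except:
--             continue
--     return real_list
--
-- def error_score_sorting(current_list, correct_list):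
--     current_list = parse_list(current_list)
--     correct_list = parse_list(correct_list)
--     num_errors = 0
--     for i in range(10):
--         num_errors += abs(
--             sum([1 for num in current_list if num == i])
--             - sum([1 for num in correct_list if num == i])
--         )
--     num_errors += sum(
--         [1 for num1, num2 in zip(current_list, current_list[1:]) if num1 > num2]
--     )
--
--     return num_errors
-- ===== SOURCE B (Python) =====
-- def parse_list(str_list):
--
--     start_list = str_list.find('[') if str_list.find('[') != -1 else 0
--     end_list = str_list.find(']') if str_list.find(']') != -1 else len(str_list)
--     list = str_list[start_list: end_list].replace(' ', '').replace("[", "").replace("]", "").replace("{", "").replace("}", "").split(',')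
--     real_list = []
--     for x in list:
--         try:
--             if x.isdigit():
--                 real_list.append(int(x))
--         except:
--             continue
--     return real_list
--
-- def error_score_sorting(current_list, correct_list):
--     cur = parse_list(current_list)
--     small = [x for x in cur if 0 <= x < 10]
--     rest = [x for x in parse_list(correct_list) if 0 <= x < 10]
--     # greedy multiset matching by removal: every matched pair cancels one
--     # occurrence on each side, so unmatched + leftovers = sum of |count diffs|
--     score = 0
--     for x in small:
--         if x in rest:
--             rest.remove(x)
--         else:
--             score += 1
--     score += len(rest)
--     # single pass counting descents with a running previous element
--     prev = None
--     for x in cur: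
--         if prev is not None and prev > x:
--             score += 1
--         prev = x
--     return score
-- ===== Notes on version B (the rewrite author's own statement) =====
-- stated objective: alternative
-- what changed: Replaces A's ten per-digit rescans by greedy multiset matching: elements of the current list are cancelled against removable occurrences in the correct list, unmatched elements plus leftovers give the frequency mismatch; the inversion term becomes a single pass tracking the previous element instead of zip(lst, lst[1:]).
import Mathlib
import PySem

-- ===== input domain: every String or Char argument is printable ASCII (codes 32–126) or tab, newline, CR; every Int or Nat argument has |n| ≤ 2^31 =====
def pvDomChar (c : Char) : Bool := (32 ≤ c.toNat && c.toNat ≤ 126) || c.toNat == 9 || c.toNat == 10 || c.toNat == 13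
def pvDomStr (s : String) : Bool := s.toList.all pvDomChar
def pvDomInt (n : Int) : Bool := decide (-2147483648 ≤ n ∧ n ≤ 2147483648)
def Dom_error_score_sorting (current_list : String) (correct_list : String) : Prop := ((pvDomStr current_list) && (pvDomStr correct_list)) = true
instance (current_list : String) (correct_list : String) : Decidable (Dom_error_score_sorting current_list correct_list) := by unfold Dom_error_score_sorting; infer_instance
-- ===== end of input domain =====

-- B replaces A's ten per-digit rescans by greedy multiset matching: each single-digit
-- element of the current list cancels a removable occurrence in the correct list, and
-- unmatched elements plus leftovers equal A's sum of per-digit count differences; the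
-- inversion term becomes one pass tracking the previous element.  Objective: alternative.

-- ===== PORT A =====
-- shared helper: literal port of parse_list (used verbatim by both Source A and Source B).
-- int(x) is reached only under x.isdigit(), where PySem.Int.ofStr? is always `some`,
-- so `.getD 0` is never taken; the try/except in the Python is dead code.
def pvParseList (str_list : String) : List Int :=
  let start_list : Int := if PySem.Str.find str_list "[" ≠ -1 then PySem.Str.find str_list "[" else 0
  let end_list : Int := if PySem.Str.find str_list "]" ≠ -1 then PySem.Str.find str_list "]" else PySem.Str.len str_list
  let cleaned : String :=
    PySem.Str.replace (PySem.Str.replace (PySem.Str.replace (PySem.Str.replace (PySem.Str.replace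
      (PySem.Str.slice str_list (some start_list) (some end_list)) " " "") "[" "") "]" "") "{" "") "}" ""
  -- split(',') with a non-empty separator never returns none
  let parts : List String := (PySem.Str.split? cleaned ",").getD []
  parts.foldl (fun real_list x =>
    if PySem.Str.strIsdigit x then real_list ++ [(PySem.Int.ofStr? x).getD 0] else real_list) []

def error_score_sorting (current_list : String) (correct_list : String) : Int :=
  let cur := pvParseList current_list
  let cor := pvParseList correct_list
  let num_errors : Int :=
    (PySem.List.pyRange 0 10 1).foldl
      (fun acc i =>
        acc + |((cur.filter (fun num => num == i)).map (fun _ => (1 : Int))).sum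
              - ((cor.filter (fun num => num == i)).map (fun _ => (1 : Int))).sum|) 0
  num_errors +
    (((cur.zip (PySem.List.slice cur (some 1) none)).filter
        (fun p => decide (p.1 > p.2))).map (fun _ => (1 : Int))).sum

-- ===== PORT B =====
def error_score_sorting_alt (current_list : String) (correct_list : String) : Int :=
  let cur := pvParseList current_list
  let small := cur.filter (fun x => decide (0 ≤ x ∧ x < 10))
  let rest0 := (pvParseList correct_list).filter (fun x => decide (0 ≤ x ∧ x < 10))
  -- greedy multiset matching by removal
  let st := small.foldl (fun (st : Int × List Int) x =>
      if x ∈ st.2 then (st.1, (PySem.List.remove? st.2 x).getD st.2)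
      else (st.1 + 1, st.2)) ((0 : Int), rest0)
  let score := st.1 + (st.2.length : Int)
  -- single pass counting descents with a running previous element
  (cur.foldl (fun (st : Int × Option Int) x =>
      (st.1 + (match st.2 with
               | some p => if p > x then (1 : Int) else 0
               | none => 0), some x)) (score, (none : Option Int))).1

-- ===== PRECONDITION & SPEC =====
def Spec_error_score_sorting (current_list : String) (correct_list : String) (out : Int) : Prop := out = error_score_sorting_alt current_list correct_list
instance (current_list : String) (correct_list : String) (out : Int) : Decidable (Spec_error_score_sorting current_list correct_list out) := by unfold Spec_error_score_sorting; infer_instance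

-- ===== CLAIM (what is proved, stated in full; the proofs are below) =====
def Claim_equal_error_score_sorting : Prop := ∀ (current_list : String) (correct_list : String), Dom_error_score_sorting current_list correct_list → Spec_error_score_sorting current_list correct_list (error_score_sorting current_list correct_list)

-- ===== LEMMAS AND PROOFS =====

-- sum over the ten digits of |count a d - count b d|
def pvSumAbs (a b : List Int) : Int :=
  (([0,1,2,3,4,5,6,7,8,9] : List Int).map
    (fun d => |(a.count d : Int) - (b.count d : Int)|)).sum

theorem pvIteSum (x : Int) (h0 : 0 ≤ x) (h1 : x < 10) :
    (([0,1,2,3,4,5,6,7,8,9] : List Int).map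
      (fun d => if d == x then (1 : Int) else 0)).sum = 1 := by
  interval_cases x <;> decide

theorem pvCountSum (L : List Int) (i : Int) :
    ((L.filter (fun num => num == i)).map (fun _ => (1 : Int))).sum = (L.count i : Int) := by
  rw [PySem.List.sum_map_const_int]
  simp [List.count, List.countP_eq_length_filter]

-- empty current side: every leftover is counted once
theorem pvSumAbs_nil (b : List Int) (hb : ∀ x ∈ b, 0 ≤ x ∧ x < 10) :
    pvSumAbs [] b = (b.length : Int) := by
  induction b with
  | nil => decide
  | cons x b ih =>
    have hx := hb x (List.mem_cons_self)
    have hb' : ∀ y ∈ b, 0 ≤ y ∧ y < 10 := fun y hy => hb y (List.mem_cons_of_mem _ hy)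
    have hmap : (fun d => |(([] : List Int).count d : Int) - ((x :: b).count d : Int)|)
        = fun d => |(([] : List Int).count d : Int) - (b.count d : Int)|
                   + (if d == x then (1 : Int) else 0) := by
      funext d
      by_cases hdx : d = x
      · subst hdx
        simp only [List.count_cons_self, List.count_nil, beq_self_eq_true, if_true,
          Int.abs_eq_natAbs]
        omega
      · simp [List.count_cons_of_ne (Ne.symm hdx), hdx]
    unfold pvSumAbs at *
    rw [hmap, PySem.List.sum_map_add_int, ih hb', pvIteSum x hx.1 hx.2]
    simp only [List.length_cons]
    push_cast
    ring

-- matched element: one occurrence cancels on each side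
theorem pvSumAbs_cons_mem (a b : List Int) (x : Int) (hx : x ∈ b) :
    pvSumAbs (x :: a) b = pvSumAbs a (b.erase x) := by
  have hpos : 1 ≤ b.count x := List.count_pos_iff.mpr hx
  have hmap : (fun d => |((x :: a).count d : Int) - (b.count d : Int)|)
      = fun d => |(a.count d : Int) - ((b.erase x).count d : Int)| := by
    funext d
    by_cases hdx : d = x
    · subst hdx
      rw [List.count_cons_self, List.count_erase_self]
      simp only [Int.abs_eq_natAbs]
      omega
    · rw [List.count_cons_of_ne (Ne.symm hdx), List.count_erase_of_ne hdx]
  unfold pvSumAbs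
  rw [hmap]

-- unmatched element: score rises by one
theorem pvSumAbs_cons_not_mem (a b : List Int) (x : Int)
    (hx : x ∉ b) (h0 : 0 ≤ x) (h1 : x < 10) :
    pvSumAbs (x :: a) b = 1 + pvSumAbs a b := by
  have hb0 : b.count x = 0 := List.count_eq_zero.mpr hx
  have hmap : (fun d => |((x :: a).count d : Int) - (b.count d : Int)|)
      = fun d => |(a.count d : Int) - (b.count d : Int)|
                 + (if d == x then (1 : Int) else 0) := by
    funext d
    by_cases hdx : d = x
    · subst hdx
      rw [List.count_cons_self, hb0]
      simp only [beq_self_eq_true, if_true, Int.abs_eq_natAbs]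
      omega
    · simp [List.count_cons_of_ne (Ne.symm hdx), hdx]
  unfold pvSumAbs
  rw [hmap, PySem.List.sum_map_add_int, pvIteSum x h0 h1]
  ring

-- invariant of the greedy removal loop
theorem pvMatchInv (a : List Int) (s : Int) (b : List Int)
    (ha : ∀ x ∈ a, 0 ≤ x ∧ x < 10) (hb : ∀ x ∈ b, 0 ≤ x ∧ x < 10) :
    (a.foldl (fun (st : Int × List Int) x =>
        if x ∈ st.2 then (st.1, (PySem.List.remove? st.2 x).getD st.2)
        else (st.1 + 1, st.2)) (s, b)).1
      + ((a.foldl (fun (st : Int × List Int) x =>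
        if x ∈ st.2 then (st.1, (PySem.List.remove? st.2 x).getD st.2)
        else (st.1 + 1, st.2)) (s, b)).2.length : Int)
      = s + pvSumAbs a b := by
  induction a generalizing s b with
  | nil => simpa using (pvSumAbs_nil b hb).symm
  | cons x a ih =>
    have hx := ha x (List.mem_cons_self)
    have ha' : ∀ y ∈ a, 0 ≤ y ∧ y < 10 := fun y hy => ha y (List.mem_cons_of_mem _ hy)
    by_cases hmem : x ∈ b
    · have hrm : (PySem.List.remove? b x).getD b = b.erase x := by
        rw [PySem.List.remove?_eq_some_erase b x hmem]; rfl
      have hb' : ∀ y ∈ b.erase x, 0 ≤ y ∧ y < 10 :=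
        fun y hy => hb y (List.mem_of_mem_erase hy)
      simp only [List.foldl_cons, if_pos hmem, hrm]
      rw [ih s (b.erase x) ha' hb', pvSumAbs_cons_mem a b x hmem]
    · simp only [List.foldl_cons, if_neg hmem]
      rw [ih (s + 1) b ha' hb, pvSumAbs_cons_not_mem a b x hmem hx.1 hx.2]
      ring

-- filtering to the digit range does not change any digit's count
theorem pvSumAbs_filter (L1 L2 : List Int) :
    pvSumAbs (L1.filter (fun x => decide (0 ≤ x ∧ x < 10)))
             (L2.filter (fun x => decide (0 ≤ x ∧ x < 10)))
      = pvSumAbs L1 L2 := by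
  unfold pvSumAbs
  apply congrArg
  apply List.map_congr_left
  intro d hd
  have hdb : 0 ≤ d ∧ d < 10 := by
    simp only [List.mem_cons, List.not_mem_nil, or_false] at hd
    rcases hd with rfl | rfl | rfl | rfl | rfl | rfl | rfl | rfl | rfl | rfl <;> norm_num
  rw [List.count_filter (by simpa using hdb), List.count_filter (by simpa using hdb)]

-- the descent loop with a running previous element counts adjacent inversions
theorem pvDescAux (L : List Int) (s p : Int) :
    (L.foldl (fun (st : Int × Option Int) x =>
        (st.1 + (match st.2 with
                 | some p => if p > x then (1 : Int) else 0
                 | none => 0), some x)) (s, some p)).1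
      = s + ((((p :: L).zip L).filter (fun q => decide (q.1 > q.2))).map
              (fun _ => (1 : Int))).sum := by
  induction L generalizing s p with
  | nil => simp
  | cons x L ih =>
    simp only [List.foldl_cons, List.zip_cons_cons, List.filter_cons]
    rw [ih]
    by_cases hpx : p > x
    · simp [hpx]; ring
    · simp [hpx]

theorem pvDescTop (L : List Int) (s : Int) :
    (L.foldl (fun (st : Int × Option Int) x =>
        (st.1 + (match st.2 with
                 | some p => if p > x then (1 : Int) else 0
                 | none => 0), some x)) (s, none)).1
      = s + (((L.zip (PySem.List.slice L (some 1) none)).filter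
              (fun q => decide (q.1 > q.2))).map (fun _ => (1 : Int))).sum := by
  rw [PySem.List.slice_from_one]
  cases L with
  | nil => simp
  | cons x L =>
    simp only [List.foldl_cons, List.tail_cons, add_zero]
    exact pvDescAux L s x

-- ===== VERDICT (by name: the statement is the Claim_ definition above) =====
theorem error_score_sorting_spec : Claim_equal_error_score_sorting := by
  intro current_list correct_list _
  unfold Spec_error_score_sorting error_score_sorting error_score_sorting_alt
  simp only []
  set cur := pvParseList current_list with hcur
  set cor := pvParseList correct_list with hcor
  -- A side: range fold is the per-digit sum of count differences
  have hrange : PySem.List.pyRange 0 10 1 = ([0,1,2,3,4,5,6,7,8,9] : List Int) := by decide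
  have hA : (PySem.List.pyRange 0 10 1).foldl
      (fun acc i =>
        acc + |((cur.filter (fun num => num == i)).map (fun _ => (1 : Int))).sum
              - ((cor.filter (fun num => num == i)).map (fun _ => (1 : Int))).sum|) 0
      = pvSumAbs cur cor := by
    rw [hrange, PySem.List.foldl_add, zero_add]
    unfold pvSumAbs
    apply congrArg
    apply List.map_congr_left
    intro d _
    rw [pvCountSum, pvCountSum]
  -- B side: greedy matching score is the same sum
  have hfa : ∀ x ∈ cur.filter (fun x => decide (0 ≤ x ∧ x < 10)), 0 ≤ x ∧ x < 10 := by
    intro x hx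
    simpa using List.of_mem_filter hx
  have hfb : ∀ x ∈ cor.filter (fun x => decide (0 ≤ x ∧ x < 10)), 0 ≤ x ∧ x < 10 := by
    intro x hx
    simpa using List.of_mem_filter hx
  have hB := pvMatchInv (cur.filter (fun x => decide (0 ≤ x ∧ x < 10))) 0
      (cor.filter (fun x => decide (0 ≤ x ∧ x < 10))) hfa hfb
  rw [pvSumAbs_filter cur cor, zero_add] at hB
  rw [hA, pvDescTop, hB]
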